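-- pv_equiv track=rewrite | github.com/paiml/depyler | examples/hard_realworld_optimizer.py | grid_search_2d
-- ===== SOURCE A (Python) =====
-- def grid_search_2d(x_start: int, x_end: int, y_start: int, y_end: int, step: int) -> list[int]:
--     """Grid search for minimum of f(x,y) = (x-20)^2 + (y-30)^2.
--     Returns [best_x, best_y, best_val]."""
--     best_x: int = x_start
--     best_y: int = y_start
--     dx: int = x_start - 20
--     dy: int = y_start - 30
--     best_val: int = dx * dx + dy * dy
--     x: int = x_start
--     while x <= x_end:
--         y: int = y_start
--         while y <= y_end:
--             dx2: int = x - 20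
--             dy2: int = y - 30
--             val: int = dx2 * dx2 + dy2 * dy2
--             if val < best_val:
--                 best_val = val
--                 best_x = x
--                 best_y = y
--             y = y + step
--         x = x + step
--     return [best_x, best_y, best_val]
-- ===== SOURCE B (Python) =====
-- def grid_search_2d(x_start: int, x_end: int, y_start: int, y_end: int, step: int) -> list[int]:
--     """Separable: f(x,y)=(x-20)^2+(y-30)^2, so optimize each axis with its own
--     1D scan (O(N+M) instead of O(N*M)); if either grid is empty, no candidate
--     beats the initial guess (x_start, y_start)."""
--     def best_1d(start, end, target):
--         best = start
--         best_d = (start - target) * (start - target)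
--         v = start + step
--         while v <= end:
--             d = (v - target) * (v - target)
--             if d < best_d:
--                 best, best_d = v, d
--             v += step
--         return best, best_d
--
--     if x_end < x_start or y_end < y_start:
--         return [x_start, y_start,
--                 (x_start - 20) ** 2 + (y_start - 30) ** 2]
--     bx, dx = best_1d(x_start, x_end, 20)
--     by, dy = best_1d(y_start, y_end, 30)
--     return [bx, by, dx + dy]
-- ===== Notes on version B (the rewrite author's own statement) =====
-- stated objective: faster
-- what changed: Exploits separability of f(x,y)=(x-20)^2+(y-30)^2: two independent 1D scans (one over the x grid, one over the y grid) replace the nested 2D scan; Pre_ excludes step<=0 with a nonempty x range, where A loops forever.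
import Mathlib
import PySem

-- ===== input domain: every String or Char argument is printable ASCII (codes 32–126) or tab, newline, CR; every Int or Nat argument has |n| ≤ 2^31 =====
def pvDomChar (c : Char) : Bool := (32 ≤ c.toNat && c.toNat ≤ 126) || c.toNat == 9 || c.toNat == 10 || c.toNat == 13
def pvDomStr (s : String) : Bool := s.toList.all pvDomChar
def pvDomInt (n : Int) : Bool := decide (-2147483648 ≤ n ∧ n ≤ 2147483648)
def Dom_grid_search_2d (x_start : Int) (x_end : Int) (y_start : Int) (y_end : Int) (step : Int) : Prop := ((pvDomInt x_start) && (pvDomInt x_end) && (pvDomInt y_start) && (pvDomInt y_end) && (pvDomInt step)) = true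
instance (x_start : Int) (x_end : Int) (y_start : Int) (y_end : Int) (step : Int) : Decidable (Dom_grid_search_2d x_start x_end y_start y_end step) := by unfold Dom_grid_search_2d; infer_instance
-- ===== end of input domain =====

-- B replaces A's nested O(N*M) grid scan by two independent 1D scans (the objective is separable), O(N+M).

-- ===== PORT A =====
-- inner `while y <= y_end` loop of A; the `0 < step` guard only makes the
-- recursion terminate — Python diverges when step ≤ 0 (excluded by Pre_).
def gsInner (y_end step x : Int) (y bx byy bv : Int) : Int × Int × Int :=
  if h : 0 < step ∧ y ≤ y_end then
    let dx2 := x - 20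
    let dy2 := y - 30
    let val := dx2 * dx2 + dy2 * dy2
    if val < bv then gsInner y_end step x (y + step) x y val
    else gsInner y_end step x (y + step) bx byy bv
  else (bx, byy, bv)
termination_by (y_end + step - y).toNat
decreasing_by all_goals (simp_wf; omega)

-- outer `while x <= x_end` loop of A
def gsOuter (x_end y_start y_end step : Int) (x bx byy bv : Int) : Int × Int × Int :=
  if h : 0 < step ∧ x ≤ x_end then
    let s := gsInner y_end step x y_start bx byy bv
    gsOuter x_end y_start y_end step (x + step) s.1 s.2.1 s.2.2
  else (bx, byy, bv)
termination_by (x_end + step - x).toNat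
decreasing_by simp_wf; omega

def grid_search_2d (x_start : Int) (x_end : Int) (y_start : Int) (y_end : Int) (step : Int) : List Int :=
  let dx := x_start - 20
  let dy := y_start - 30
  let r := gsOuter x_end y_start y_end step x_start x_start y_start (dx * dx + dy * dy)
  [r.1, r.2.1, r.2.2]

-- ===== PORT B =====
-- B's 1D `while v <= end` scan (same totalizing guard remark as above)
def best1d (endv step target : Int) (best best_d v : Int) : Int × Int :=
  if h : 0 < step ∧ v ≤ endv then
    let d := (v - target) * (v - target)
    if d < best_d then best1d endv step target v d (v + step)
    else best1d endv step target best best_d (v + step)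
  else (best, best_d)
termination_by (endv + step - v).toNat
decreasing_by all_goals (simp_wf; omega)

def grid_search_2d_alt (x_start : Int) (x_end : Int) (y_start : Int) (y_end : Int) (step : Int) : List Int :=
  if x_end < x_start ∨ y_end < y_start then
    [x_start, y_start, (x_start - 20) * (x_start - 20) + (y_start - 30) * (y_start - 30)]
  else
    let rx := best1d x_end step 20 x_start ((x_start - 20) * (x_start - 20)) (x_start + step)
    let ry := best1d y_end step 30 y_start ((y_start - 30) * (y_start - 30)) (y_start + step)
    [rx.1, ry.1, rx.2 + ry.2]

-- ===== PRECONDITION & SPEC =====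
-- Pre_ excludes exactly the inputs where Python A never returns: step ≤ 0 with
-- x_start ≤ x_end makes A's while loops run forever.
def Pre_grid_search_2d (x_start : Int) (x_end : Int) (y_start : Int) (y_end : Int) (step : Int) : Prop :=
  0 < step ∨ x_end < x_start
instance (x_start : Int) (x_end : Int) (y_start : Int) (y_end : Int) (step : Int) : Decidable (Pre_grid_search_2d x_start x_end y_start y_end step) := by unfold Pre_grid_search_2d; infer_instance

def pvWitness_grid_search_2d : Int × Int × Int × Int × Int := (0, 5, 0, 5, 2)

def Spec_grid_search_2d (x_start : Int) (x_end : Int) (y_start : Int) (y_end : Int) (step : Int) (out : List Int) : Prop := out = grid_search_2d_alt x_start x_end y_start y_end step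
instance (x_start : Int) (x_end : Int) (y_start : Int) (y_end : Int) (step : Int) (out : List Int) : Decidable (Spec_grid_search_2d x_start x_end y_start y_end step out) := by unfold Spec_grid_search_2d; infer_instance

-- ===== CLAIM (what is proved, stated in full; the proofs are below) =====
def Claim_equal_grid_search_2d : Prop := ∀ (x_start : Int) (x_end : Int) (y_start : Int) (y_end : Int) (step : Int), Dom_grid_search_2d x_start x_end y_start y_end step → Pre_grid_search_2d x_start x_end y_start y_end step → Spec_grid_search_2d x_start x_end y_start y_end step (grid_search_2d x_start x_end y_start y_end step)

-- ===== LEMMAS AND PROOFS =====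

-- the grid points start, start+step, … ≤ stop (empty when step ≤ 0)
def gridL (s e st : Int) : List Int :=
  if h : 0 < st ∧ s ≤ e then s :: gridL (s + st) e st else []
termination_by (e + st - s).toNat
decreasing_by simp_wf; omega

-- first minimizer of `key` in a list
def amf (key : Int → Int) : List Int → Option Int
  | [] => none
  | t :: ts =>
    match amf key ts with
    | none => some t
    | some u => if key t ≤ key u then some t else some u

theorem amf_ne_none (key : Int → Int) (a : Int) (l : List Int) :
    amf key (a :: l) ≠ none := by
  simp only [amf]
  cases amf key l
  · simp
  · dsimp only; split <;> simp

theorem amf_congr (k1 k2 : Int → Int) (l : List Int)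
    (h : ∀ a b, (k1 a ≤ k1 b ↔ k2 a ≤ k2 b)) : amf k1 l = amf k2 l := by
  induction l with
  | nil => rfl
  | cons t ts ih =>
    simp only [amf, ih]
    cases amf k2 ts with
    | none => rfl
    | some u => dsimp only; rw [if_congr (h t u) rfl rfl]

theorem amf_min (key : Int → Int) (l : List Int) (u : Int)
    (hu : amf key l = some u) : ∀ v ∈ l, key u ≤ key v := by
  induction l generalizing u with
  | nil => simp [amf] at hu
  | cons t ts ih =>
    simp only [amf] at hu
    intro v hv
    cases hts : amf key ts with
    | none =>
      rw [hts] at hu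
      dsimp only at hu
      cases hu
      cases ts with
      | nil =>
        rcases List.mem_cons.1 hv with rfl | hvts
        · exact le_refl _
        · simp at hvts
      | cons a as => exact absurd hts (amf_ne_none key a as)
    | some w =>
      rw [hts] at hu
      dsimp only at hu
      rcases List.mem_cons.1 hv with rfl | hvts
      · split at hu <;> cases hu
        · exact le_refl _
        · rename_i hgt; omega
      · have hw := ih w hts v hvts
        split at hu <;> cases hu <;> omega

theorem amf_cons_some (key : Int → Int) (a : Int) (l : List Int) :
    ∃ u, amf key (a :: l) = some u := by
  simp only [amf]
  cases amf key l with
  | none => exact ⟨a, rfl⟩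
  | some u =>
    dsimp only
    split
    · exact ⟨a, rfl⟩
    · exact ⟨u, rfl⟩

-- generic fold characterization, triple state (result, aux, current best key)
theorem foldl3_amf (key v1 v2 : Int → Int) (l : List Int) :
    ∀ s : Int × Int × Int,
      List.foldl (fun s t => if key t < s.2.2 then (v1 t, v2 t, key t) else s) s l
      = match amf key l with
        | none => s
        | some u => if key u < s.2.2 then (v1 u, v2 u, key u) else s := by
  induction l with
  | nil => intro s; rfl
  | cons t ts ih =>
    intro s
    rw [List.foldl_cons, ih]
    simp only [amf]
    cases hts : amf key ts with
    | none => dsimp only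
    | some u =>
      rcases s with ⟨a, b, c⟩
      dsimp only
      simp only [apply_ite (fun p : Int × Int × Int => p.2.2)]
      split_ifs <;> dsimp only <;> split_ifs <;> first | rfl | omega

-- generic fold characterization, pair state (result, current best key)
theorem foldl2_amf (key : Int → Int) (l : List Int) :
    ∀ s : Int × Int,
      List.foldl (fun s t => if key t < s.2 then (t, key t) else s) s l
      = match amf key l with
        | none => s
        | some u => if key u < s.2 then (u, key u) else s := by
  induction l with
  | nil => intro s; rfl
  | cons t ts ih =>
    intro s
    rw [List.foldl_cons, ih]
    simp only [amf]
    cases hts : amf key ts with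
    | none => dsimp only
    | some u =>
      rcases s with ⟨a, c⟩
      dsimp only
      simp only [apply_ite (fun p : Int × Int => p.2)]
      split_ifs <;> dsimp only <;> split_ifs <;> first | rfl | omega

theorem gsInner_eq_fold (y_end st x : Int) :
    ∀ y bx byy bv, gsInner y_end st x y bx byy bv
      = List.foldl (fun s t => if (x - 20) * (x - 20) + (t - 30) * (t - 30) < s.2.2
            then (x, t, (x - 20) * (x - 20) + (t - 30) * (t - 30)) else s)
          (bx, byy, bv) (gridL y y_end st) := by
  intro y bx byy bv
  induction y, bx, byy, bv using gsInner.induct y_end st x with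
  | case1 y bx byy bv h _dx2 _dy2 _val hlt ih =>
    have hlt' : (x - 20) * (x - 20) + (y - 30) * (y - 30) < bv := hlt
    rw [gsInner, dif_pos h, gridL, dif_pos h, List.foldl_cons]
    dsimp only
    rw [if_pos hlt', if_pos hlt']
    exact ih
  | case2 y bx byy bv h _dx2 _dy2 _val hlt ih =>
    have hlt' : ¬ (x - 20) * (x - 20) + (y - 30) * (y - 30) < bv := hlt
    rw [gsInner, dif_pos h, gridL, dif_pos h, List.foldl_cons]
    dsimp only
    rw [if_neg hlt', if_neg hlt']
    exact ih
  | case3 y bx byy bv h =>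
    rw [gsInner, dif_neg h, gridL, dif_neg h]
    rfl

theorem best1d_eq_fold (endv st tgt : Int) :
    ∀ b bd v, best1d endv st tgt b bd v
      = List.foldl (fun s t => if (t - tgt) * (t - tgt) < s.2
            then (t, (t - tgt) * (t - tgt)) else s)
          (b, bd) (gridL v endv st) := by
  intro b bd v
  induction b, bd, v using best1d.induct endv st tgt with
  | case1 b bd v h _d hlt ih =>
    have hlt' : (v - tgt) * (v - tgt) < bd := hlt
    rw [best1d, dif_pos h, gridL, dif_pos h, List.foldl_cons]
    dsimp only
    rw [if_pos hlt', if_pos hlt']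
    exact ih
  | case2 b bd v h _d hlt ih =>
    have hlt' : ¬ (v - tgt) * (v - tgt) < bd := hlt
    rw [best1d, dif_pos h, gridL, dif_pos h, List.foldl_cons]
    dsimp only
    rw [if_neg hlt', if_neg hlt']
    exact ih
  | case3 b bd v h =>
    rw [best1d, dif_neg h, gridL, dif_neg h]
    rfl

theorem gsOuter_eq_fold (x_end y_start y_end st : Int) :
    ∀ x bx byy bv, gsOuter x_end y_start y_end st x bx byy bv
      = List.foldl (fun s t => gsInner y_end st t y_start s.1 s.2.1 s.2.2)
          (bx, byy, bv) (gridL x x_end st) := by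
  intro x bx byy bv
  induction x, bx, byy, bv using gsOuter.induct x_end y_start y_end st with
  | case1 x bx byy bv h _s ih =>
    rw [gsOuter, dif_pos h, gridL, dif_pos h, List.foldl_cons]
    dsimp only
    exact ih
  | case2 x bx byy bv h =>
    rw [gsOuter, dif_neg h, gridL, dif_neg h]
    rfl

theorem gridL_head (s e st : Int) (h : 0 < st ∧ s ≤ e) :
    gridL s e st = s :: gridL (s + st) e st := by
  rw [gridL]; simp [h]

theorem gridL_nil (s e st : Int) (h : ¬ (0 < st ∧ s ≤ e)) : gridL s e st = [] := by
  rw [gridL]; simp [h]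

theorem foldl_id (l : List Int) (s : Int × Int × Int) :
    List.foldl (fun (s : Int × Int × Int) (_ : Int) => s) s l = s := by
  induction l generalizing s with
  | nil => rfl
  | cons t ts ih => simp [List.foldl_cons, ih]

-- B's 1D scan returns exactly (first argmin, its key) over the full grid
theorem best1d_spec (endv st tgt strt : Int) (hst : 0 < st) (hle : strt ≤ endv)
    (u : Int) (hu : amf (fun t => (t - tgt) * (t - tgt)) (gridL strt endv st) = some u) :
    best1d endv st tgt strt ((strt - tgt) * (strt - tgt)) (strt + st)
      = (u, (u - tgt) * (u - tgt)) := by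
  rw [best1d_eq_fold, foldl2_amf]
  rw [gridL_head strt endv st ⟨hst, hle⟩] at hu
  simp only [amf] at hu
  rcases htl : amf (fun t => (t - tgt) * (t - tgt)) (gridL (strt + st) endv st) with _ | w <;>
    rw [htl] at hu <;> dsimp only at hu ⊢
  · cases hu; rfl
  · split at hu <;> cases hu
    · rename_i hle'
      rw [if_neg (by omega)]
    · rename_i hgt
      rw [if_pos (by omega)]

-- ===== VERDICT (by name: the statement is the Claim_ definition above) =====
theorem grid_search_2d_spec : Claim_equal_grid_search_2d := by
  unfold Claim_equal_grid_search_2d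
  intro xs xe ys ye st _ hpre
  unfold Spec_grid_search_2d grid_search_2d grid_search_2d_alt
  dsimp only
  by_cases hx : xe < xs
  · -- x grid empty: A's outer loop never runs
    rw [gsOuter_eq_fold, gridL_nil _ _ _ (by omega)]
    simp [hx]
  · have hst : 0 < st := by rcases hpre with h | h; exact h; omega
    have hxle : xs ≤ xe := by omega
    by_cases hy : ye < ys
    · -- y grid empty: inner loop never updates the state
      rw [gsOuter_eq_fold]
      have hid : List.foldl (fun (s : Int × Int × Int) t => gsInner ye st t ys s.1 s.2.1 s.2.2)
            (xs, ys, (xs-20)*(xs-20) + (ys-30)*(ys-30)) (gridL xs xe st)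
          = (xs, ys, (xs-20)*(xs-20) + (ys-30)*(ys-30)) := by
        rw [List.foldl_ext _ (fun (s : Int × Int × Int) (_ : Int) => s) _
              (fun s t _ => by rw [gsInner_eq_fold, gridL_nil _ _ _ (by omega)]; rfl)]
        exact foldl_id _ _
      rw [hid, if_pos (Or.inr hy)]
    · -- both grids nonempty
      have hyle : ys ≤ ye := by omega
      rw [if_neg (by omega)]
      set g : Int → Int := fun t => (t - 20) * (t - 20) with hg
      set h : Int → Int := fun t => (t - 30) * (t - 30) with hh
      obtain ⟨ym, hym⟩ := (gridL_head ys ye st ⟨hst, hyle⟩ ▸ amf_cons_some h ys (gridL (ys + st) ye st) :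
        ∃ u, amf h (gridL ys ye st) = some u)
      obtain ⟨xm, hxm⟩ := (gridL_head xs xe st ⟨hst, hxle⟩ ▸ amf_cons_some g xs (gridL (xs + st) xe st) :
        ∃ u, amf g (gridL xs xe st) = some u)
      -- A's side
      rw [gsOuter_eq_fold]
      have hinner : ∀ t (s : Int × Int × Int),
          gsInner ye st t ys s.1 s.2.1 s.2.2
            = if g t + h ym < s.2.2 then (t, ym, g t + h ym) else s := by
        intro t s
        rw [gsInner_eq_fold, foldl3_amf]
        have hc : amf (fun y => (t - 20) * (t - 20) + (y - 30) * (y - 30)) (gridL ys ye st)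
            = amf h (gridL ys ye st) := by
          apply amf_congr; intro a b; simp only [hh]; omega
        rw [hc, hym]
      have hA : List.foldl (fun s t => gsInner ye st t ys s.1 s.2.1 s.2.2)
            (xs, ys, (xs-20)*(xs-20) + (ys-30)*(ys-30)) (gridL xs xe st)
          = if g xm + h ym < g xs + h ys then (xm, ym, g xm + h ym)
            else (xs, ys, g xs + h ys) := by
        rw [List.foldl_ext _ (fun (s : Int × Int × Int) t => if g t + h ym < s.2.2 then (t, ym, g t + h ym) else s) _
              (fun s t _ => hinner t s)]
        rw [foldl3_amf (fun t => g t + h ym) (fun t => t) (fun _ => ym)]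
        have hc : amf (fun t => g t + h ym) (gridL xs xe st) = amf g (gridL xs xe st) := by
          apply amf_congr; intro a b; omega
        rw [hc, hxm]
      rw [hA]
      -- B's side
      rw [best1d_spec xe st 20 xs hst hxle xm hxm,
          best1d_spec ye st 30 ys hst hyle ym hym]
      dsimp only
      -- compare
      have hgx : g xm ≤ g xs := amf_min g _ xm hxm xs
        (by rw [gridL_head xs xe st ⟨hst, hxle⟩]; exact List.mem_cons_self ..)
      have hhy : h ym ≤ h ys := amf_min h _ ym hym ys
        (by rw [gridL_head ys ye st ⟨hst, hyle⟩]; exact List.mem_cons_self ..)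
      by_cases hmin : g xm + h ym < g xs + h ys
      · rw [if_pos hmin]
      · rw [if_neg hmin]
        have hgeq : g xm = g xs := by omega
        have hheq : h ym = h ys := by omega
        have hxm' : xm = xs := by
          rw [gridL_head xs xe st ⟨hst, hxle⟩] at hxm
          simp only [amf] at hxm
          rcases htl : amf g (gridL (xs + st) xe st) with _ | w <;>
            rw [htl] at hxm <;> dsimp only at hxm
          · cases hxm; rfl
          · split at hxm <;> cases hxm
            · rfl
            · omega
        have hym' : ym = ys := by
          rw [gridL_head ys ye st ⟨hst, hyle⟩] at hym
          simp only [amf] at hym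
          rcases htl : amf h (gridL (ys + st) ye st) with _ | w <;>
            rw [htl] at hym <;> dsimp only at hym
          · cases hym; rfl
          · split at hym <;> cases hym
            · rfl
            · omega
        subst hxm' hym'
        rfl
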